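-- pv_equiv track=rewrite | github.com/emx/sage | integrations/levelup/results/control_arm_50/challenges/vanilla_run_16/app.py | waf_check
-- ===== SOURCE A (Python) =====
-- def waf_check(input_str):
--     if not input_str:
--         return True
--     blacklist = ['UNION', 'SELECT', 'OR', 'AND', ' ', '--', 'SLEEP', 'BENCHMARK']
--     for word in blacklist:
--         if word in input_str.upper():
--             return False
--     return True
-- ===== SOURCE B (Python) =====
-- def waf_check(input_str):
--     if not input_str:
--         return True
--     words = ('UNION', 'SELECT', 'OR', 'AND', ' ', '--', 'SLEEP', 'BENCHMARK')
--     s = input_str.upper()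
--     for i in range(len(s)):
--         if any(s.startswith(w, i) for w in words):
--             return False
--     return True
-- ===== Notes on version B (the rewrite author's own statement) =====
-- stated objective: alternative
-- what changed: Replaces eight independent substring scans of the uppercased input by a single left-to-right pass over its positions, testing at each position whether any blacklist word starts there.
import Mathlib
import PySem

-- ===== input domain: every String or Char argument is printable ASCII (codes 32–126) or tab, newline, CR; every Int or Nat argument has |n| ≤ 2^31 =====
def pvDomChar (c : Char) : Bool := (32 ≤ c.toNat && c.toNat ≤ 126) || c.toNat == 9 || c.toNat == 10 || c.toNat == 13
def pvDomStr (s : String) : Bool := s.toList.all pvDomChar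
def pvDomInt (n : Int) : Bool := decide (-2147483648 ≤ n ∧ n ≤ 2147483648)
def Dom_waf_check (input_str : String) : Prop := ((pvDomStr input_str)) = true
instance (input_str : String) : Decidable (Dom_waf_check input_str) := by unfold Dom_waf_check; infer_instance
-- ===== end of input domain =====

-- B replaces A's eight independent substring scans by one left-to-right pass over
-- the positions of the uppercased input, testing each blacklist word at each position.


-- ===== PORT A =====
-- 'for word in blacklist: if word in input_str.upper(): return False' as structural recursion
def wafLoopA (input_str : String) : List String → Bool
  | [] => true
  | w :: ws => if PySem.Str.isIn w (PySem.Str.upper input_str) then false else wafLoopA input_str ws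

def waf_check (input_str : String) : Bool :=
  if input_str = "" then true
  else wafLoopA input_str ["UNION", "SELECT", "OR", "AND", " ", "--", "SLEEP", "BENCHMARK"]

-- ===== PORT B =====
-- s.startswith(w, i) (0 ≤ i) is exactly 'w is a prefix of s[i:]'; range(len(s)) is List.range.
def waf_check_alt (input_str : String) : Bool :=
  if input_str = "" then true
  else
    !((List.range (PySem.Chars.upper input_str.toList).length).any fun i =>
        (["UNION", "SELECT", "OR", "AND", " ", "--", "SLEEP", "BENCHMARK"].any fun w =>
          PySem.Chars.startswith ((PySem.Chars.upper input_str.toList).drop i) w.toList))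

-- ===== PRECONDITION & SPEC =====
def Spec_waf_check (input_str : String) (out : Bool) : Prop := out = waf_check_alt input_str
instance (input_str : String) (out : Bool) : Decidable (Spec_waf_check input_str out) := by unfold Spec_waf_check; infer_instance

-- ===== CLAIM (what is proved, stated in full; the proofs are below) =====
def Claim_equal_waf_check : Prop := ∀ (input_str : String), Dom_waf_check input_str → Spec_waf_check input_str (waf_check input_str)

-- ===== LEMMAS AND PROOFS =====

-- A's early-return loop is the negated 'any word occurs'.
theorem wafLoopA_eq_any (s : String) (ws : List String) :
    wafLoopA s ws = !(ws.any fun w => PySem.Str.isIn w (PySem.Str.upper s)) := by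
  induction ws with
  | nil => rfl
  | cons w ws ih =>
    simp only [wafLoopA, List.any_cons, ih]
    by_cases h : PySem.Str.isIn w (PySem.Str.upper s) = true <;> simp

-- a nonempty word occurs in cs iff it starts at some position i < cs.length
theorem isIn_eq_any_range (sub cs : List Char) (hsub : sub ≠ []) :
    PySem.Chars.isIn sub cs
      = (List.range cs.length).any fun i => PySem.Chars.startswith (cs.drop i) sub := by
  rw [Bool.eq_iff_iff]
  simp only [List.any_eq_true, List.mem_range, PySem.Chars.startswith_iff]
  constructor
  · intro h
    obtain ⟨j, hj⟩ := (PySem.Chars.exists_prefix_drop_iff_isIn (sub := sub) (s := cs)).mpr h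
    refine ⟨j, ?_, hj⟩
    by_contra hge
    push Not at hge
    rw [List.drop_eq_nil_of_le hge] at hj
    exact hsub (List.prefix_nil.mp hj)
  · rintro ⟨i, _, hi⟩
    exact (PySem.Chars.exists_prefix_drop_iff_isIn (sub := sub) (s := cs)).mp ⟨i, hi⟩

-- swap the two 'any's (positions ↔ words)
theorem any_swap {α β : Type} (xs : List α) (ys : List β) (P : α → β → Bool) :
    (xs.any fun x => ys.any fun y => P x y) = (ys.any fun y => xs.any fun x => P x y) := by
  rw [Bool.eq_iff_iff]
  simp only [List.any_eq_true]
  tauto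

-- bridge one word's Str-level occurrence test to the position scan on the uppercased char list
theorem keyw (s w : String) (hne : w.toList ≠ []) :
    PySem.Str.isIn w (PySem.Str.upper s)
      = (List.range (PySem.Chars.upper s.toList).length).any fun i =>
          PySem.Chars.startswith ((PySem.Chars.upper s.toList).drop i) w.toList := by
  rw [PySem.Str.isIn_eq, PySem.Str.toList_upper]
  exact isIn_eq_any_range w.toList (PySem.Chars.upper s.toList) hne

-- ===== VERDICT (by name: the statement is the Claim_ definition above) =====
theorem waf_check_spec : Claim_equal_waf_check := by
  intro s _
  unfold Spec_waf_check waf_check waf_check_alt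
  by_cases hs : s = ""
  · simp [hs]
  · simp only [if_neg hs]
    rw [wafLoopA_eq_any, any_swap]
    congr 1
    simp only [List.any_cons, List.any_nil]
    rw [keyw s "UNION" (by decide), keyw s "SELECT" (by decide), keyw s "OR" (by decide),
        keyw s "AND" (by decide), keyw s " " (by decide), keyw s "--" (by decide),
        keyw s "SLEEP" (by decide), keyw s "BENCHMARK" (by decide)]
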